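-- pv_equiv track=rewrite | github.com/rayandrew/clio | clio/flashnet/preprocessing/feature_engineering.py | append_queue_len
-- ===== SOURCE A (Python) =====
-- def append_queue_len(latency, ts_submit):
--     queue_process = []
--     queue_len = []
--     for i in range(len(ts_submit)):
--         while queue_process and queue_process[0] < ts_submit[i]:
--             queue_process.pop(0)
--         queue_process.append(ts_submit[i])
--         queue_process.sort()
--         queue_len.append(len(queue_process))
--     return queue_len
-- ===== SOURCE B (Python) =====
-- def append_queue_len(latency, ts_submit):
--     # Jump-pointer DP: prev[i] = index of the nearest earlier timestamp >= ts_submit[i]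
--     # (found by chasing prev links, amortized O(1)), or -1.  The surviving queue at i
--     # is exactly the chain i, prev[i], prev[prev[i]], ..., so out[i] = out[prev[i]] + 1.
--     prev = []
--     out = []
--     for i in range(len(ts_submit)):
--         j = i - 1
--         while j >= 0 and ts_submit[j] < ts_submit[i]:
--             j = prev[j]
--         prev.append(j)
--         out.append(out[j] + 1 if j >= 0 else 1)
--     return out
-- ===== Notes on version B (the rewrite author's own statement) =====
-- stated objective: faster
-- what changed: Replaced the per-step re-sort plus front-popping queue with a previous->= jump-pointer DP: prev[i] is found by chasing prev links (amortized O(1)) and out[i] = out[prev[i]] + 1, so no queue/stack of timestamps is kept and no sorting happens; O(n^2 log n) worst case becomes O(n).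
import Mathlib
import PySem

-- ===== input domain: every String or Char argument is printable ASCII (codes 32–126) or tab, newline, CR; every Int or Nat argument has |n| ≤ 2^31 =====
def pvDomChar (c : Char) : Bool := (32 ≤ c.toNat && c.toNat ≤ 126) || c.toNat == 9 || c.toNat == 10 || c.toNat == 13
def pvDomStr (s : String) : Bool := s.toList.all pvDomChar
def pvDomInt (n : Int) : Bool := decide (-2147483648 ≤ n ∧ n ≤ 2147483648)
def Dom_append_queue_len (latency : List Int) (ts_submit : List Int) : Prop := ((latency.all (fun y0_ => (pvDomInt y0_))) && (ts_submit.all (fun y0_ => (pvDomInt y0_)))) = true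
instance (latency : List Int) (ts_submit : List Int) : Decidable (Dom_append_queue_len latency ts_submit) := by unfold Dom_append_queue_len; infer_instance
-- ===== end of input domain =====

-- B replaces A's per-step sort-and-pop-front queue by a previous->=-index jump-pointer DP (out[i] = out[prev[i]] + 1); return values proved equal, and B measured faster.


-- ===== PORT A =====
-- 'while queue_process and queue_process[0] < ts_submit[i]: queue_process.pop(0)'
def pyPopFrontLt (qp : List Int) (t : Int) : List Int :=
  match qp with
  | [] => []
  | x :: rest => if x < t then pyPopFrontLt rest t else x :: rest

-- one iteration of A's for-loop: while-pop, append, .sort(), record length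
def stepA (st : List Int × List Int) (t : Int) : List Int × List Int :=
  let qp := pyPopFrontLt st.1 t                              -- the while-pop loop
  let qp := PySem.List.sorted (qp ++ [t]) (fun x => x) false -- append + .sort()
  (qp, st.2 ++ [(qp.length : Int)])

def append_queue_len (latency : List Int) (ts_submit : List Int) : List Int :=
  (ts_submit.foldl stepA ([], [])).2

-- ===== PORT B =====
-- 'j = i - 1; while j >= 0 and ts_submit[j] < ts_submit[i]: j = prev[j]'
-- (fuel makes the jump chase total; prev entries strictly decrease, so fuel i+1 is never exhausted)
def jumpB (ts prev : List Int) (t : Int) : Int → Nat → Int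
  | j, 0 => j
  | j, f + 1 =>
    if 0 ≤ j ∧ ts.getD j.toNat 0 < t then jumpB ts prev t (prev.getD j.toNat (-1)) f else j

-- the for-loop over i, carrying the prev and out arrays
def goB (ts : List Int) (i : Nat) (prev out : List Int) : List Int :=
  if i < ts.length then
    let j := jumpB ts prev (ts.getD i 0) ((i : Int) - 1) (i + 1)
    goB ts (i + 1) (prev ++ [j]) (out ++ [if 0 ≤ j then out.getD j.toNat 0 + 1 else 1])
  else out
termination_by ts.length - i

def append_queue_len_alt (latency : List Int) (ts_submit : List Int) : List Int :=
  goB ts_submit 0 [] []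

-- ===== PRECONDITION & SPEC =====
def Spec_append_queue_len (latency : List Int) (ts_submit : List Int) (out : List Int) : Prop := out = append_queue_len_alt latency ts_submit
instance (latency : List Int) (ts_submit : List Int) (out : List Int) : Decidable (Spec_append_queue_len latency ts_submit out) := by unfold Spec_append_queue_len; infer_instance

-- ===== CLAIM (what is proved, stated in full; the proofs are below) =====
def Claim_equal_append_queue_len : Prop := ∀ (latency : List Int) (ts_submit : List Int), Dom_append_queue_len latency ts_submit → Spec_append_queue_len latency ts_submit (append_queue_len latency ts_submit)

-- ===== LEMMAS AND PROOFS =====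

-- intermediate form: a monotonic stack (top-first), proved equal to both ports
def popTopLt (stack : List Int) (t : Int) : List Int :=
  match stack with
  | [] => []
  | x :: rest => if x < t then popTopLt rest t else x :: rest

def stepS (st : List Int × List Int) (t : Int) : List Int × List Int :=
  let stack := t :: popTopLt st.1 t
  (stack, st.2 ++ [(stack.length : Int)])

theorem popTopLt_eq_pyPopFrontLt (qp : List Int) (t : Int) : popTopLt qp t = pyPopFrontLt qp t := by
  induction qp with
  | nil => rfl
  | cons x rest ih => simp [popTopLt, pyPopFrontLt, ih]

theorem pyPopFrontLt_sorted (qp : List Int) (t : Int) (h : qp.Pairwise (· ≤ ·)) :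
    (pyPopFrontLt qp t).Pairwise (· ≤ ·) := by
  induction qp with
  | nil => simp [pyPopFrontLt]
  | cons x rest ih =>
    rw [List.pairwise_cons] at h
    by_cases hx : x < t
    · simpa [pyPopFrontLt, hx] using ih h.2
    · simpa [pyPopFrontLt, hx] using List.pairwise_cons.mpr h

theorem pyPopFrontLt_ge (qp : List Int) (t : Int) (h : qp.Pairwise (· ≤ ·)) :
    ∀ x ∈ pyPopFrontLt qp t, t ≤ x := by
  induction qp with
  | nil => simp [pyPopFrontLt]
  | cons x rest ih =>
    rw [List.pairwise_cons] at h
    by_cases hx : x < t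
    · simpa [pyPopFrontLt, hx] using ih h.2
    · intro y hy
      simp [pyPopFrontLt, hx] at hy
      rcases hy with rfl | hy
      · omega
      · have := h.1 y hy; omega

theorem sorted_step (xs : List Int) (t : Int) (hs : xs.Pairwise (· ≤ ·)) (hg : ∀ x ∈ xs, t ≤ x) :
    PySem.List.sorted (xs ++ [t]) (fun x => x) false = t :: xs := by
  apply PySem.List.sorted_id_eq_of_perm_of_pairwise
  · simpa using (List.perm_append_comm (l₁ := [t]) (l₂ := xs))
  · exact List.pairwise_cons.mpr ⟨hg, hs⟩

theorem foldA_eq_foldS (ts : List Int) (qp out : List Int) (h : qp.Pairwise (· ≤ ·)) :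
    ts.foldl stepA (qp, out) = ts.foldl stepS (qp, out) := by
  induction ts generalizing qp out with
  | nil => rfl
  | cons t rest ih =>
    have hs := pyPopFrontLt_sorted qp t h
    have hg := pyPopFrontLt_ge qp t h
    have hstep := sorted_step (pyPopFrontLt qp t) t hs hg
    have h1 : stepA (qp, out) t = (t :: pyPopFrontLt qp t, out ++ [((t :: pyPopFrontLt qp t).length : Int)]) := by
      simp [stepA, hstep]
    have h2 : stepS (qp, out) t = (t :: pyPopFrontLt qp t, out ++ [((t :: pyPopFrontLt qp t).length : Int)]) := by
      simp [stepS, popTopLt_eq_pyPopFrontLt]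
    rw [List.foldl_cons, List.foldl_cons, h1, h2]
    exact ih _ _ (List.pairwise_cons.mpr ⟨hg, hs⟩)

-- the value chain following prev pointers from index j (top-first stack contents)
def chainV (ts prev : List Int) : Int → Nat → List Int
  | _, 0 => []
  | j, f + 1 =>
    if 0 ≤ j then ts.getD j.toNat 0 :: chainV ts prev (prev.getD j.toNat (-1)) f else []

-- invariant: every prev entry points strictly backwards
def PrevInv (prev : List Int) : Prop := ∀ k : Nat, k < prev.length → prev.getD k (-1) < (k : Int)

theorem prev_step_lt (prev : List Int) (hinv : PrevInv prev) (j : Int) (hj : 0 ≤ j) :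
    prev.getD j.toNat (-1) < j := by
  by_cases h : j.toNat < prev.length
  · have := hinv j.toNat h; omega
  · rw [List.getD_eq_getElem?_getD, List.getElem?_eq_none (by omega)]; simp; omega

theorem chainV_fuel (ts prev : List Int) (hinv : PrevInv prev) :
    ∀ (f f' : Nat) (j : Int), j < (f : Int) → j < (f' : Int) →
      chainV ts prev j f = chainV ts prev j f' := by
  intro f
  induction f with
  | zero =>
    intro f' j hf _
    cases f' with
    | zero => rfl
    | succ f' =>
      have hneg : ¬ (0 ≤ j) := by omega
      simp [chainV, hneg]
  | succ f ih =>
    intro f' j hf hf'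
    by_cases hj : 0 ≤ j
    · cases f' with
      | zero => omega
      | succ f' =>
        have hlt := prev_step_lt prev hinv j hj
        simp only [chainV, if_pos hj]
        rw [ih f' (prev.getD j.toNat (-1)) (by omega) (by omega)]
    · cases f' with
      | zero => simp [chainV, hj]
      | succ f' => simp [chainV, hj]

theorem chainV_append (ts prev : List Int) (x : Int) (hinv : PrevInv prev) :
    ∀ (f : Nat) (j : Int), j < (prev.length : Int) →
      chainV ts (prev ++ [x]) j f = chainV ts prev j f := by
  intro f
  induction f with
  | zero => intro j _; rfl
  | succ f ih =>
    intro j hj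
    by_cases h : 0 ≤ j
    · have hjn : j.toNat < prev.length := by omega
      have hget : (prev ++ [x]).getD j.toNat (-1) = prev.getD j.toNat (-1) := by
        rw [List.getD_eq_getElem?_getD, List.getD_eq_getElem?_getD,
          List.getElem?_append_left hjn]
      have hlt := prev_step_lt prev hinv j h
      simp only [chainV, if_pos h, hget]
      rw [ih (prev.getD j.toNat (-1)) (by omega)]
    · simp [chainV, h]

theorem jumpB_pop (ts prev : List Int) (t : Int) (hinv : PrevInv prev) :
    ∀ (f : Nat) (j : Int), j < (f : Int) →
      jumpB ts prev t j f ≤ j ∧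
      popTopLt (chainV ts prev j f) t = chainV ts prev (jumpB ts prev t j f) f := by
  intro f
  induction f with
  | zero => intro j hf; exact ⟨le_refl j, rfl⟩
  | succ f ih =>
    intro j hf
    by_cases hj : 0 ≤ j
    · by_cases hlt : ts.getD j.toNat 0 < t
      · have hplt := prev_step_lt prev hinv j hj
        have ihp := ih (prev.getD j.toNat (-1)) (by omega)
        have hjump : jumpB ts prev t j (f + 1) = jumpB ts prev t (prev.getD j.toNat (-1)) f := by
          rw [jumpB, if_pos ⟨hj, hlt⟩]
        constructor
        · rw [hjump]; omega
        · simp only [chainV, if_pos hj, popTopLt, if_pos hlt, hjump]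
          rw [ihp.2]
          exact chainV_fuel ts prev hinv f (f + 1) _ (by omega) (by omega)
      · have hjump : jumpB ts prev t j (f + 1) = j := by
          rw [jumpB, if_neg (fun h => hlt h.2)]
        refine ⟨by omega, ?_⟩
        rw [hjump]
        simp only [chainV, if_pos hj, popTopLt, if_neg hlt]
    · have hjump : jumpB ts prev t j (f + 1) = j := by
        rw [jumpB, if_neg (fun h => hj h.1)]
      rw [hjump]
      exact ⟨le_refl j, by simp [chainV, hj, popTopLt]⟩

theorem foldS_eq_goB (ts : List Int) :
    ∀ (rem : List Int) (i : Nat) (prev out stack : List Int),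
      rem = ts.drop i → i ≤ ts.length → prev.length = i → out.length = i →
      PrevInv prev →
      stack = chainV ts prev ((i : Int) - 1) i →
      (∀ k : Nat, k < i → out.getD k 0 = ((chainV ts prev (k : Int) (k + 1)).length : Int)) →
      (rem.foldl stepS (stack, out)).2 = goB ts i prev out := by
  intro rem
  induction rem with
  | nil =>
    intro i prev out stack hdrop hile _ _ _ _ _
    have hge : ts.length ≤ i := by
      by_contra h
      have := List.drop_eq_nil_iff.mp hdrop.symm
      omega
    rw [goB]
    simp [Nat.not_lt.mpr hge]
  | cons t rest ih =>
    intro i prev out stack hdrop hile hplen holen hinv hstack houtlen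
    have hi : i < ts.length := by
      by_contra h
      rw [List.drop_eq_nil_iff.mpr (by omega)] at hdrop
      simp at hdrop
    have ht : ts.getD i 0 = t := by
      have h1 : ts[i]? = some t := by
        rw [← Nat.add_zero i, ← List.getElem?_drop, ← hdrop]
        rfl
      rw [List.getD_eq_getElem?_getD, h1]
      rfl
    have hrest : rest = ts.drop (i + 1) := by
      rw [← List.tail_drop, ← hdrop]
      rfl
    -- the jump
    set j := jumpB ts prev (ts.getD i 0) ((i : Int) - 1) (i + 1) with hjdef
    have hjp := jumpB_pop ts prev (ts.getD i 0) hinv (i + 1) ((i : Int) - 1) (by push_cast; omega)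
    have hjle : j ≤ (i : Int) - 1 := hjp.1
    -- stack with fuel i+1
    have hstack' : stack = chainV ts prev ((i : Int) - 1) (i + 1) := by
      rw [hstack]
      by_cases hi0 : i = 0
      · subst hi0; norm_num [chainV]
      · exact chainV_fuel ts prev hinv i (i + 1) _ (by omega) (by push_cast; omega)
    have hpop : popTopLt stack (ts.getD i 0) = chainV ts prev j (i + 1) := by
      rw [hstack']; exact hjp.2
    -- new prev invariant
    have hinv' : PrevInv (prev ++ [j]) := by
      intro k hk
      simp at hk
      by_cases hki : k < prev.length
      · rw [List.getD_eq_getElem?_getD, List.getElem?_append_left hki,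
          ← List.getD_eq_getElem?_getD]
        exact hinv k hki
      · have hkeq : k = prev.length := by omega
        subst hkeq
        rw [List.getD_eq_getElem?_getD, List.getElem?_append_right (le_refl _)]
        simp
        omega
    -- chain of the extended prev from index i
    have hprevget : (prev ++ [j]).getD i (-1) = j := by
      rw [List.getD_eq_getElem?_getD, ← hplen, List.getElem?_append_right (le_refl _)]
      simp
    have hchain_new : chainV ts (prev ++ [j]) (i : Int) (i + 1) = ts.getD i 0 :: chainV ts prev j (i + 1) := by
      rw [chainV, if_pos (by positivity : (0 : Int) ≤ (i : Int)), Int.toNat_natCast, hprevget,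
        chainV_append ts prev j hinv i j (by omega),
        chainV_fuel ts prev hinv i (i + 1) j (by omega) (by omega)]
    -- the recorded length equals B's out entry
    have hlen_entry :
        (((ts.getD i 0 :: chainV ts prev j (i + 1)).length : Int)) =
        (if 0 ≤ j then out.getD j.toNat 0 + 1 else 1) := by
      by_cases hj0 : 0 ≤ j
      · rw [if_pos hj0]
        have hjn : j.toNat < i := by omega
        have hout := houtlen j.toNat hjn
        have hjcast : ((j.toNat : Nat) : Int) = j := by omega
        rw [hjcast,
          chainV_fuel ts prev hinv (j.toNat + 1) (i + 1) j (by omega) (by omega)] at hout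
        rw [List.length_cons, hout]
        push_cast
        ring
      · rw [if_neg hj0]
        have hnil : chainV ts prev j (i + 1) = [] := by
          rw [chainV, if_neg hj0]
        simp [hnil]
    -- step equality and recursion
    rw [goB, if_pos hi]
    rw [List.foldl_cons]
    have hstep : stepS (stack, out) t =
        (ts.getD i 0 :: chainV ts prev j (i + 1),
         out ++ [if 0 ≤ j then out.getD j.toNat 0 + 1 else 1]) := by
      simp only [stepS, ← ht, hpop, hlen_entry]
    rw [hstep]
    apply ih (i + 1) (prev ++ [j]) _ _ hrest (by omega) (by simp [hplen]) (by simp [holen])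
      hinv'
    · push_cast
      rw [add_sub_cancel_right, hchain_new]
    · -- out-length invariant for the extended arrays
      intro k hk
      by_cases hki : k < i
      · have hgo : (out ++ [if 0 ≤ j then out.getD j.toNat 0 + 1 else 1]).getD k 0 = out.getD k 0 := by
          rw [List.getD_eq_getElem?_getD, List.getElem?_append_left (by omega),
            ← List.getD_eq_getElem?_getD]
        rw [hgo, houtlen k hki,
          chainV_append ts prev j hinv (k + 1) (k : Int) (by omega)]
      · have hkeq : k = i := by omega
        subst hkeq
        have hgo : (out ++ [if 0 ≤ j then out.getD j.toNat 0 + 1 else 1]).getD k 0 =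
            (if 0 ≤ j then out.getD j.toNat 0 + 1 else 1) := by
          rw [List.getD_eq_getElem?_getD, ← holen, List.getElem?_append_right (le_refl _)]
          simp
        rw [hgo, hchain_new, hlen_entry]

-- ===== VERDICT (by name: the statement is the Claim_ definition above) =====
theorem append_queue_len_spec : Claim_equal_append_queue_len := by
  intro latency ts_submit _
  unfold Spec_append_queue_len append_queue_len append_queue_len_alt
  rw [foldA_eq_foldS ts_submit [] [] (by simp)]
  exact foldS_eq_goB ts_submit ts_submit 0 [] [] [] rfl (by omega) rfl rfl
    (by intro k hk; simp at hk) rfl (by intro k hk; omega)
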